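-- pv_equiv track=rewrite | github.com/coollabsio/coolify | templates/Epicyon/epicyon-data/webapp_post.py | replace_link_variable
-- ===== SOURCE A (Python) =====
-- def replace_link_variable(link: str, variable_name: str, value: str,
--                           separator: str) -> str:
--     """Replaces a variable within the given link
--     """
--     full_var = separator + variable_name + '='
--     if full_var not in link:
--         return link
--
--     curr_str = link
--     result = ''
--     while full_var in curr_str:
--         prefix = curr_str.split(full_var, 1)[0] + full_var
--         next_str = curr_str.split(full_var, 1)[1]
--         if separator in next_str:
--             next_str = next_str.split(separator, 1)[1]
--             result += prefix + value + separator
--             curr_str = next_str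
--         else:
--             result += prefix + value
--             curr_str = ''
--     return result + curr_str
-- ===== SOURCE B (Python) =====
-- def replace_link_variable(link: str, variable_name: str, value: str,
--                           separator: str) -> str:
--     """Replaces a variable within the given link
--     """
--     full_var = separator + variable_name + '='
--     j = link.find(full_var)
--     if j < 0:
--         return link
--     m = j + len(full_var)
--     head = link[:m] + value
--     rest = link[m:]
--     k = rest.find(separator)
--     if k < 0:
--         return head
--     return head + separator + replace_link_variable(
--         rest[k + len(separator):], variable_name, value, separator)
-- ===== Notes on version B (the rewrite author's own statement) =====
-- stated objective: simpler
-- what changed: replaces A's while loop with repeated split(full_var,1)/split(separator,1) calls and a growing result accumulator by direct index arithmetic (find + slicing) and plain recursion on the remaining suffix, dropping the initial containment guard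
-- crash fix: when separator is '' and separator+variable_name+'=' occurs in link, A raises ValueError from the inner split('', 1); B returns the link with each occurrence's value replaced (e.g. 'ax=Vb') — e.g. on replace_link_variable("ax=b", "x", "V", ""): A raises ValueError, B returns "ax=Vb"
import Mathlib
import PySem

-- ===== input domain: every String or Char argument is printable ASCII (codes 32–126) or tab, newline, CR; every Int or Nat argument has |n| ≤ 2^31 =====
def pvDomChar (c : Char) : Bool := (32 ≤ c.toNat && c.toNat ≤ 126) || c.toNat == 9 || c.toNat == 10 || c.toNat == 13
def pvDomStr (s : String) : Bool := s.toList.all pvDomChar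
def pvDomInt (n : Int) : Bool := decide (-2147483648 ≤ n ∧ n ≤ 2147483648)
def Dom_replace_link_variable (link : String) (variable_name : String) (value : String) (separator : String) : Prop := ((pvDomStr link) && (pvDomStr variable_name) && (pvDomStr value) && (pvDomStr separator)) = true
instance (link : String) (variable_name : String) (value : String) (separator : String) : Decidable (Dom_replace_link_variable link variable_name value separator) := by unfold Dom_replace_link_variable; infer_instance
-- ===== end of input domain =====

-- B replaces A's while loop (repeated split(full_var, 1)/split(separator, 1) with a growing
-- result accumulator) by direct index arithmetic: find + slicing + plain recursion on the
-- remaining suffix; the initial containment guard disappears.  Objective: simpler, same cost.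

-- ===== PORT A =====
-- A's while loop: each pass consumes the text up to and including the first separator after
-- the first `full_var`, so `curr` strictly shrinks; fuel `|link| + 1` therefore never runs out.
-- `splitMax? … = none` happens only for an empty separator, where Python raises ValueError
-- (excluded by Pre_); the `result ++ curr` placeholder there is never the claimed value.
def rlvLoopA (fv sep value : List Char) : Nat → List Char → List Char → List Char
  | 0, curr, result => result ++ curr
  | n + 1, curr, result =>
    if PySem.Chars.isIn fv curr then
      match PySem.Chars.splitMax? curr fv 1 with
      | none => result ++ curr   -- unreachable: fv ends with '=' so fv ≠ ""
      | some parts =>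
        let pre := (PySem.List.pyGet? parts 0).getD [] ++ fv
        let next := (PySem.List.pyGet? parts 1).getD []
        if PySem.Chars.isIn sep next then
          match PySem.Chars.splitMax? next sep 1 with
          | none => result ++ curr   -- sep = "": Python raises ValueError here (outside Pre_)
          | some p2 =>
              rlvLoopA fv sep value n ((PySem.List.pyGet? p2 1).getD []) (result ++ pre ++ value ++ sep)
        else result ++ pre ++ value
    else result ++ curr

def replace_link_variable (link : String) (variable_name : String) (value : String) (separator : String) : String :=
  let fv := separator.toList ++ variable_name.toList ++ ['=']
  if PySem.Chars.isIn fv link.toList then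
    String.ofList (rlvLoopA fv separator.toList value.toList (link.toList.length + 1) link.toList [])
  else link

-- ===== PORT B =====
-- Source B's recursion, fuel `|link| + 1`: every level drops at least `full_var` (nonempty) from
-- the front, so the fuel suffices on every input.  The slices link[:m] / link[m:] with
-- 0 ≤ m ≤ len(link) are exactly take/drop.
def rlvGoB (fv sep value : List Char) : Nat → List Char → List Char
  | 0, s => s
  | n + 1, s =>
    let j := PySem.Chars.find s fv
    if j < 0 then s
    else
      let m := j.toNat + fv.length
      let head := s.take m ++ value
      let rest := s.drop m
      let k := PySem.Chars.find rest sep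
      if k < 0 then head
      else head ++ sep ++ rlvGoB fv sep value n (rest.drop (k.toNat + sep.length))

def replace_link_variable_alt (link : String) (variable_name : String) (value : String) (separator : String) : String :=
  String.ofList (rlvGoB (separator.toList ++ variable_name.toList ++ ['=']) separator.toList value.toList
    (link.toList.length + 1) link.toList)

-- ===== PRECONDITION & SPEC =====
-- Excluded: exactly the inputs where A raises ValueError (empty separator while
-- separator+variable_name+'=' occurs in link: the inner split('', 1) raises).
def Pre_replace_link_variable (link : String) (variable_name : String) (value : String) (separator : String) : Prop :=
  separator ≠ "" ∨ PySem.Str.isIn (separator ++ variable_name ++ "=") link = false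
instance (link : String) (variable_name : String) (value : String) (separator : String) : Decidable (Pre_replace_link_variable link variable_name value separator) := by unfold Pre_replace_link_variable; infer_instance
def pvWitness_replace_link_variable : String × String × String × String := ("u?page=1&user=2", "page", "9", "?")

-- A raises ValueError (split with empty separator) when separator is "" and
-- separator+variable_name+'=' occurs in link; B returns the link with every occurrence's value replaced.
def Raises_replace_link_variable (link : String) (variable_name : String) (value : String) (separator : String) : Prop :=
  separator = "" ∧ PySem.Str.isIn (separator ++ variable_name ++ "=") link = true
instance (link : String) (variable_name : String) (value : String) (separator : String) : Decidable (Raises_replace_link_variable link variable_name value separator) := by unfold Raises_replace_link_variable; infer_instance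
def pvRaiseWitness_replace_link_variable : String × String × String × String := ("ax=b", "x", "V", "")
def pvRaiseWitnessOut_replace_link_variable : String := "ax=Vb"

def Spec_replace_link_variable (link : String) (variable_name : String) (value : String) (separator : String) (out : String) : Prop := out = replace_link_variable_alt link variable_name value separator
instance (link : String) (variable_name : String) (value : String) (separator : String) (out : String) : Decidable (Spec_replace_link_variable link variable_name value separator out) := by unfold Spec_replace_link_variable; infer_instance

-- ===== CLAIM (what is proved, stated in full; the proofs are below) =====
def Claim_equal_replace_link_variable : Prop := ∀ (link : String) (variable_name : String) (value : String) (separator : String), Dom_replace_link_variable link variable_name value separator → Pre_replace_link_variable link variable_name value separator → Spec_replace_link_variable link variable_name value separator (replace_link_variable link variable_name value separator)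
def Claim_raises_replace_link_variable : Prop := (∀ (link : String) (variable_name : String) (value : String) (separator : String), Dom_replace_link_variable link variable_name value separator → Raises_replace_link_variable link variable_name value separator → ¬ Pre_replace_link_variable link variable_name value separator) ∧ (Dom_replace_link_variable (pvRaiseWitness_replace_link_variable.1) (pvRaiseWitness_replace_link_variable.2.1) (pvRaiseWitness_replace_link_variable.2.2.1) (pvRaiseWitness_replace_link_variable.2.2.2) ∧ Raises_replace_link_variable (pvRaiseWitness_replace_link_variable.1) (pvRaiseWitness_replace_link_variable.2.1) (pvRaiseWitness_replace_link_variable.2.2.1) (pvRaiseWitness_replace_link_variable.2.2.2) ∧ replace_link_variable_alt (pvRaiseWitness_replace_link_variable.1) (pvRaiseWitness_replace_link_variable.2.1) (pvRaiseWitness_replace_link_variable.2.2.1) (pvRaiseWitness_replace_link_variable.2.2.2) = pvRaiseWitnessOut_replace_link_variable)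

-- ===== LEMMAS AND PROOFS =====

-- find s sub is the unique index with sub a prefix at it and at no earlier index.
lemma rlv_find_eq (s sub : List Char) (j : Nat)
    (h1 : sub <+: s.drop j) (h2 : ∀ i < j, ¬ sub <+: s.drop i) :
    PySem.Chars.find s sub = (j : Int) := by
  have hin : sub <:+: s := List.infix_iff_prefix_suffix.mpr ⟨s.drop j, h1, List.drop_suffix j s⟩
  have hnn : 0 ≤ PySem.Chars.find s sub := (PySem.Chars.find_nonneg_iff _ _).mpr hin
  obtain ⟨hp, hmin⟩ := PySem.Chars.find_spec hnn
  rcases lt_trichotomy (PySem.Chars.find s sub).toNat j with h | h | h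
  · exact absurd hp (h2 _ h)
  · omega
  · exact absurd h1 (hmin _ h)

lemma rlv_prefix_find_zero (s sub : List Char) (h : sub <+: s) :
    PySem.Chars.find s sub = 0 :=
  rlv_find_eq s sub 0 h (by omega)

lemma rlv_find_cons (c : Char) (rest sub : List Char)
    (hnp : ¬ sub <+: (c :: rest)) (hin : sub <:+: rest) :
    PySem.Chars.find (c :: rest) sub = PySem.Chars.find rest sub + 1 := by
  have hnn : 0 ≤ PySem.Chars.find rest sub := (PySem.Chars.find_nonneg_iff _ _).mpr hin
  obtain ⟨hp, hmin⟩ := PySem.Chars.find_spec hnn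
  have := rlv_find_eq (c :: rest) sub ((PySem.Chars.find rest sub).toNat + 1)
    (by simpa using hp)
    (by
      intro i hi
      cases i with
      | zero => simpa using hnp
      | succ i => simpa using hmin i (by omega))
  omega

-- splitOnMax.go with maxsplit 0 returns the remaining text as one piece.
lemma rlv_go_zero (sep : List Char) (fuel : Nat) (l cur : List Char) (acc : List (List Char)) :
    PySem.Chars.splitOnMax.go sep fuel 0 l cur acc = ((cur.reverse ++ l) :: acc).reverse := by
  cases fuel <;> cases l <;> simp [PySem.Chars.splitOnMax.go]

-- Characterisation of split(sep, 1) (sep ≠ "") via find: at most one cut, at the first occurrence.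
lemma rlv_go_one (sep : List Char) (hsep : sep ≠ []) :
    ∀ (l : List Char), ∀ fuel, l.length + 1 ≤ fuel → ∀ (cur : List Char) (acc : List (List Char)),
    PySem.Chars.splitOnMax.go sep fuel 1 l cur acc =
      if PySem.Chars.isIn sep l then
        acc.reverse ++ [cur.reverse ++ l.take (PySem.Chars.find l sep).toNat,
                        l.drop ((PySem.Chars.find l sep).toNat + sep.length)]
      else acc.reverse ++ [cur.reverse ++ l] := by
  intro l
  induction l with
  | nil =>
    intro fuel hf cur acc
    have : PySem.Chars.isIn sep [] = false :=
      (PySem.Chars.isIn_eq_false_iff _ _).mpr (by simp [List.infix_nil, hsep])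
    cases fuel with
    | zero => omega
    | succ n => simp [PySem.Chars.splitOnMax.go, this]
  | cons c rest ih =>
    intro fuel hf cur acc
    cases fuel with
    | zero => omega
    | succ n =>
      by_cases hp : sep.isPrefixOf (c :: rest)
      · have hpre : sep <+: (c :: rest) := List.isPrefixOf_iff_prefix.mp hp
        have hfind : PySem.Chars.find (c :: rest) sep = 0 := rlv_prefix_find_zero _ _ hpre
        have hin : PySem.Chars.isIn sep (c :: rest) = true :=
          (PySem.Chars.isIn_iff_infix _ _).mpr hpre.isInfix
        simp [PySem.Chars.splitOnMax.go, hp, hin, hfind, rlv_go_zero]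
      · by_cases hin : PySem.Chars.isIn sep rest
        · have hinf : sep <:+: rest := (PySem.Chars.isIn_iff_infix _ _).mp hin
          have hnp : ¬ sep <+: (c :: rest) := fun h => hp (List.isPrefixOf_iff_prefix.mpr h)
          have hfind := rlv_find_cons c rest sep hnp hinf
          have hnn : 0 ≤ PySem.Chars.find rest sep := (PySem.Chars.find_nonneg_iff _ _).mpr hinf
          have hin' : PySem.Chars.isIn sep (c :: rest) = true :=
            (PySem.Chars.isIn_iff_infix _ _).mpr (List.infix_cons_iff.mpr (Or.inr hinf))
          rw [PySem.Chars.splitOnMax.go]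
          simp only [hp, if_neg (by omega : ¬ (1 : Nat) = 0)]
          rw [ih n (by simpa using hf) (c :: cur) acc]
          have htn : (PySem.Chars.find (c :: rest) sep).toNat
              = (PySem.Chars.find rest sep).toNat + 1 := by omega
          simp only [hin, hin', htn, if_true, List.take_succ_cons]
          rw [show (PySem.Chars.find rest sep).toNat + 1 + sep.length
                = ((PySem.Chars.find rest sep).toNat + sep.length) + 1 from by omega,
              List.drop_succ_cons]
          simp
        · have hnp : ¬ sep <+: (c :: rest) := fun h => hp (List.isPrefixOf_iff_prefix.mpr h)
          have hin' : PySem.Chars.isIn sep (c :: rest) = false :=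
            (PySem.Chars.isIn_eq_false_iff _ _).mpr (by
              intro h
              rcases List.infix_cons_iff.mp h with h | h
              · exact hnp h
              · exact ((PySem.Chars.isIn_eq_false_iff _ _).mp (by simpa using hin)) h)
          rw [PySem.Chars.splitOnMax.go]
          simp only [hp, if_neg (by omega : ¬ (1 : Nat) = 0)]
          rw [ih n (by simpa using hf) (c :: cur) acc]
          simp [hin, hin']

lemma rlv_splitOnMax_one (s sep : List Char) (hsep : sep ≠ []) :
    PySem.Chars.splitOnMax s sep 1 =
      if PySem.Chars.isIn sep s then
        [s.take (PySem.Chars.find s sep).toNat,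
         s.drop ((PySem.Chars.find s sep).toNat + sep.length)]
      else [s] := by
  rw [PySem.Chars.splitOnMax]
  rw [if_neg (by omega : ¬ (1 : Int) < 0)]
  have := rlv_go_one sep hsep s (s.length + 1) (by omega) [] []
  simpa using this

-- take (find + |sub|) splits off the text up to and including the first occurrence of sub.
lemma rlv_take_find_add (s sub : List Char) (h : PySem.Chars.isIn sub s = true) :
    s.take ((PySem.Chars.find s sub).toNat + sub.length)
      = s.take (PySem.Chars.find s sub).toNat ++ sub := by
  have hnn : 0 ≤ PySem.Chars.find s sub :=
    (PySem.Chars.find_nonneg_iff _ _).mpr ((PySem.Chars.isIn_iff_infix _ _).mp h)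
  obtain ⟨hp, -⟩ := PySem.Chars.find_spec hnn
  rw [List.take_add]
  congr 1
  exact (List.prefix_iff_eq_take.mp hp).symm

-- The two loops agree step for step: A's split(full_var,1)/split(sep,1) pass peels exactly
-- the slice B computes with find, for every fuel value.
lemma rlv_pyGet_two_zero (a b : List Char) : (PySem.List.pyGet? [a, b] 0).getD [] = a := rfl
lemma rlv_pyGet_two_one (a b : List Char) : (PySem.List.pyGet? [a, b] 1).getD [] = b := rfl

lemma rlv_loop_eq_go (fv sep value : List Char) (hfv : fv ≠ []) (hsep : sep ≠ []) :
    ∀ (n : Nat) (curr result : List Char),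
    rlvLoopA fv sep value n curr result = result ++ rlvGoB fv sep value n curr := by
  intro n
  induction n with
  | zero => intro curr result; simp [rlvLoopA, rlvGoB]
  | succ n ih =>
    intro curr result
    by_cases h : PySem.Chars.isIn fv curr
    · have hnn : 0 ≤ PySem.Chars.find curr fv :=
        (PySem.Chars.find_nonneg_iff _ _).mpr ((PySem.Chars.isIn_iff_infix _ _).mp h)
      rw [rlvLoopA, rlvGoB]
      simp only [h, if_true, PySem.Chars.splitMax?, List.isEmpty_iff, if_neg hfv,
        rlv_splitOnMax_one curr fv hfv, if_neg (by omega : ¬ PySem.Chars.find curr fv < 0)]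
      simp only [rlv_pyGet_two_zero, rlv_pyGet_two_one]
      by_cases h2 : PySem.Chars.isIn sep (curr.drop ((PySem.Chars.find curr fv).toNat + fv.length))
      · have hnn2 : 0 ≤ PySem.Chars.find (curr.drop ((PySem.Chars.find curr fv).toNat + fv.length)) sep :=
          (PySem.Chars.find_nonneg_iff _ _).mpr ((PySem.Chars.isIn_iff_infix _ _).mp h2)
        simp only [h2, if_true, PySem.Chars.splitMax?, if_neg hsep,
          rlv_splitOnMax_one _ sep hsep,
          if_neg (by omega : ¬ PySem.Chars.find (curr.drop ((PySem.Chars.find curr fv).toNat + fv.length)) sep < 0)]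
        simp only [rlv_pyGet_two_one]
        rw [ih]
        simp [← rlv_take_find_add curr fv h, List.append_assoc]
      · have hfind2 : PySem.Chars.find (curr.drop ((PySem.Chars.find curr fv).toNat + fv.length)) sep = -1 :=
          (PySem.Chars.find_eq_neg_one_iff _ _).mpr
            (fun hc => by simp [(PySem.Chars.isIn_iff_infix _ _).mpr hc] at h2)
        rw [if_neg h2,
          if_pos (show PySem.Chars.find (curr.drop ((PySem.Chars.find curr fv).toNat + fv.length)) sep < 0 by omega)]
        simp [← rlv_take_find_add curr fv h, List.append_assoc]
    · have hfind : PySem.Chars.find curr fv = -1 :=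
        (PySem.Chars.find_eq_neg_one_iff _ _).mpr
          (fun hc => by simp [(PySem.Chars.isIn_iff_infix _ _).mpr hc] at h)
      rw [rlvLoopA, rlvGoB, if_neg h, if_pos (show PySem.Chars.find curr fv < 0 by omega)]

-- ===== VERDICT (by name: the statement is the Claim_ definition above) =====
theorem replace_link_variable_spec : Claim_equal_replace_link_variable := by
  intro link variable_name value separator _ hpre
  unfold Spec_replace_link_variable replace_link_variable replace_link_variable_alt
  set fv := separator.toList ++ variable_name.toList ++ ['='] with hfveq
  have hfv : fv ≠ [] := by simp [hfveq]
  by_cases h : PySem.Chars.isIn fv link.toList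
  · have hsep : separator.toList ≠ [] := by
      rcases hpre with hs | hno
      · intro he; exact hs (String.toList_inj.mp (he.trans rfl))
      · exfalso
        rw [hfveq] at h
        simp only [PySem.Str.isIn, String.toList_append] at hno
        rw [show ("=" : String).toList = ['='] from rfl] at hno
        rw [h] at hno
        cases hno
    rw [if_pos h, rlv_loop_eq_go fv separator.toList value.toList hfv hsep]
    simp
  · rw [if_neg h]
    have : PySem.Chars.find link.toList fv = -1 :=
      (PySem.Chars.find_eq_neg_one_iff _ _).mpr
        (fun hc => (by simpa [h] using (PySem.Chars.isIn_iff_infix _ _).mpr hc : False))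
    rw [rlvGoB]
    simp [this, String.ofList_toList]

@[simp] theorem replace_link_variable_raises : Claim_raises_replace_link_variable := by
  unfold Claim_raises_replace_link_variable
  constructor
  · intro link variable_name value separator _ hr hpre
    rcases hpre with hs | hno
    · exact hs hr.1
    · rw [hr.2] at hno; cases hno
  · exact ⟨by decide, by decide, by decide⟩
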